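-- pv_equiv track=rewrite | github.com/sto/python-zxcvbn | zxcvbn/matching.py | enumerate_l33t_subs
-- ===== SOURCE A (Python) =====
-- def enumerate_l33t_subs(table):
--     subs = [[]]
--
--     def dedup(subs):
--         deduped = []
--         members = set()
--         for sub in subs:
--             key = str(sorted(sub))
--             if key not in members:
--                 deduped.append(sub)
--         return deduped
--
--     keys = list(table.keys())
--     while len(keys) > 0:
--         first_key = keys[0]
--         rest_keys = keys[1:]
--         next_subs = []
--         for l33t_chr in table[first_key]:
--             for sub in subs:
--                 dup_l33t_index = -1
--                 for i in range(0, len(sub)):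
--                     if sub[i][0] == l33t_chr:
--                         dup_l33t_index = i
--                         break
--                 if dup_l33t_index == -1:
--                     sub_extension = list(sub)
--                     sub_extension.append((l33t_chr, first_key))
--                     next_subs.append(sub_extension)
--                 else:
--                     sub_alternative = list(sub)
--                     sub_alternative.pop(dup_l33t_index)
--                     sub_alternative.append((l33t_chr, first_key))
--                     next_subs.append(sub)
--                     next_subs.append(sub_alternative)
--         subs = dedup(next_subs)
--         keys = rest_keys
--     return map(dict, subs)
-- ===== SOURCE B (Python) =====
-- def enumerate_l33t_subs(table):
--     def extend(sub, ch, key):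
--         if all(p[0] != ch for p in sub):
--             return [sub + [(ch, key)]]
--         return [sub, [p for p in sub if p[0] != ch] + [(ch, key)]]
--
--     def helper(keys, subs):
--         if not keys:
--             return subs
--         k = keys[0]
--         nxt = [e for ch in table[k] for sub in subs for e in extend(sub, ch, k)]
--         return helper(keys[1:], nxt)
--
--     return map(dict, helper(list(table.keys()), [[]]))
-- ===== Notes on version B (the rewrite author's own statement) =====
-- stated objective: simpler
-- what changed: Replaces the while-loop over keys by a recursive helper, the break-scan + pop duplicate handling by an all()-membership test and a filter comprehension, builds next_subs as one nested comprehension instead of explicit appends, and drops the dedup pass (its 'members' set is never updated, so it is the identity).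
import Mathlib
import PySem

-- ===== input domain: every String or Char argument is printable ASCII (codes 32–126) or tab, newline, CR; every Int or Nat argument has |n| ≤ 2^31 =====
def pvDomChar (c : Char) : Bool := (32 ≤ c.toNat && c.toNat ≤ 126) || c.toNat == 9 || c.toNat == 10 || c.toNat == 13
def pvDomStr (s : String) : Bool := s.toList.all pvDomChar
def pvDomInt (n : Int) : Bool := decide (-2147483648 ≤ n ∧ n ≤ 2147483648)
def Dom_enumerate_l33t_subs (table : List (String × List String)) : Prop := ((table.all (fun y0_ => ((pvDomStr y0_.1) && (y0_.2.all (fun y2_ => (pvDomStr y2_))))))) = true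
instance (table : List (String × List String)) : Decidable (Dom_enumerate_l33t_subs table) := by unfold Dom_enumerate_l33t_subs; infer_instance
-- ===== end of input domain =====

-- B replaces A's while-loop + index-scan + no-op dedup by a recursion over the key
-- list with comprehension-built extensions (simpler, same cost); both return map(dict, subs).

-- ===== PORT A =====
-- Python repr of a string (exact for the printable-ASCII + tab/newline/CR domain)
def pyReprChar (q : Char) (c : Char) : List Char :=
  if c = '\\' then ['\\', '\\']
  else if c = q then ['\\', q]
  else if c = '\t' then ['\\', 't']
  else if c = '\n' then ['\\', 'n']
  else if c = '\r' then ['\\', 'r']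
  else [c]

def pyReprStr (s : String) : String :=
  if s.toList.contains '\'' && !(s.toList.contains '"') then
    String.ofList ('"' :: s.toList.flatMap (pyReprChar '"') ++ ['"'])
  else
    String.ofList ('\'' :: s.toList.flatMap (pyReprChar '\'') ++ ['\''])

-- str(sorted(sub)) for a list of 2-tuples of strings
def pyReprSortedPairs (sub : List (String × String)) : String :=
  let sortedSub := PySem.List.sorted2 sub (fun p => p.1) (fun p => p.2)
  "[" ++ PySem.Str.join ", "
    (sortedSub.map (fun p => "(" ++ pyReprStr p.1 ++ ", " ++ pyReprStr p.2 ++ ")")) ++ "]"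

-- the inner 'dedup' helper of A (its 'members' set is never updated)
def dedupA (subs : List (List (String × String))) : List (List (String × String)) :=
  (subs.foldl
    (fun (st : List (List (String × String)) × PySem.Set String) sub =>
      let key := pyReprSortedPairs sub
      if PySem.Set.contains st.2 key then st else (st.1 ++ [sub], st.2))
    ([], PySem.Set.empty)).1

-- the while-loop over keys: each iteration consumes keys[0], so recursion on the key list
def loopA (table : PySem.Dict String (List String)) :
    List String → List (List (String × String)) → List (List (String × String))
  | [], subs => subs
  | first_key :: rest_keys, subs =>
      let next_subs :=
        (table.getD first_key []).foldl (fun acc l33t_chr =>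
          subs.foldl (fun acc2 sub =>
            -- 'for i in range(0, len(sub)): if sub[i][0] == l33t_chr: …; break'
            match List.findIdx? (fun p => p.1 == l33t_chr) sub with
            | none => acc2 ++ [sub ++ [(l33t_chr, first_key)]]
            | some i => (acc2 ++ [sub]) ++ [sub.eraseIdx i ++ [(l33t_chr, first_key)]]) acc) []
      loopA table rest_keys (dedupA next_subs)

def enumerate_l33t_subs (table : List (String × List String)) : List (List (String × String)) :=
  let d : PySem.Dict String (List String) := PySem.Dict.mk table
  (loopA d d.keys [[]]).map (fun sub => (PySem.Dict.ofList sub).items)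

-- ===== PORT B =====
def extendB (sub : List (String × String)) (ch k : String) : List (List (String × String)) :=
  if sub.all (fun p => p.1 != ch) then [sub ++ [(ch, k)]]
  else [sub, sub.filter (fun p => p.1 != ch) ++ [(ch, k)]]

def helperB (table : PySem.Dict String (List String)) :
    List String → List (List (String × String)) → List (List (String × String))
  | [], subs => subs
  | k :: rest, subs =>
      helperB table rest
        ((table.getD k []).flatMap (fun ch => subs.flatMap (fun sub => extendB sub ch k)))

def enumerate_l33t_subs_alt (table : List (String × List String)) : List (List (String × String)) :=
  let d : PySem.Dict String (List String) := PySem.Dict.mk table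
  (helperB d d.keys [[]]).map (fun sub => (PySem.Dict.ofList sub).items)

-- ===== PRECONDITION & SPEC =====
def Spec_enumerate_l33t_subs (table : List (String × List String)) (out : List (List (String × String))) : Prop := out = enumerate_l33t_subs_alt table
instance (table : List (String × List String)) (out : List (List (String × String))) : Decidable (Spec_enumerate_l33t_subs table out) := by unfold Spec_enumerate_l33t_subs; infer_instance

-- ===== CLAIM (what is proved, stated in full; the proofs are below) =====
def Claim_equal_enumerate_l33t_subs : Prop := ∀ (table : List (String × List String)), Dom_enumerate_l33t_subs table → Spec_enumerate_l33t_subs table (enumerate_l33t_subs table)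

-- ===== LEMMAS AND PROOFS =====

-- A's dedup never adds to 'members', so it is the identity
theorem dedupA_aux (subs : List (List (String × String)))
    (acc : List (List (String × String))) :
    (subs.foldl
      (fun (st : List (List (String × String)) × PySem.Set String) sub =>
        let key := pyReprSortedPairs sub
        if PySem.Set.contains st.2 key then st else (st.1 ++ [sub], st.2))
      (acc, PySem.Set.empty)).1 = acc ++ subs := by
  induction subs generalizing acc with
  | nil => simp
  | cons s t ih =>
      simp only [List.foldl_cons]
      have hc : PySem.Set.contains (PySem.Set.empty : PySem.Set String) (pyReprSortedPairs s) = false := by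
        simp [PySem.Set.contains, PySem.Set.empty]
      simp only [hc, if_neg Bool.false_ne_true, ih]
      simp

theorem dedupA_eq_self (subs : List (List (String × String))) : dedupA subs = subs := by
  have h := dedupA_aux subs []
  simpa [dedupA] using h

-- no-duplicate-firsts invariant
def NodupFst (sub : List (String × String)) : Prop := (sub.map Prod.fst).Nodup

-- first-index erase equals filter, for a list with distinct first components
theorem eraseIdx_eq_filter (ch : String) :
    ∀ (l : List (String × String)), NodupFst l →
    ∀ i, List.findIdx? (fun p => p.1 == ch) l = some i →
    l.eraseIdx i = l.filter (fun p => p.1 != ch) := by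
  intro l
  induction l with
  | nil => intro _ i h; simp at h
  | cons a t ih =>
      intro hnd i h
      have hnd' : NodupFst t := by
        simpa [NodupFst] using (List.nodup_cons.mp hnd).2
      have hmem : a.1 ∉ t.map Prod.fst := (List.nodup_cons.mp hnd).1
      by_cases hch : a.1 = ch
      · have hcb : (a.1 == ch) = true := by simpa using hch
        have h0 : i = 0 := by
          simp [List.findIdx?_cons, hcb] at h
          omega
        subst h0
        have ht : t.filter (fun p => p.1 != ch) = t := by
          apply List.filter_eq_self.mpr
          intro p hp
          simp only [bne_iff_ne, ne_eq]
          intro hpe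
          apply hmem
          have : p.1 ∈ t.map Prod.fst := List.mem_map.mpr ⟨p, hp, rfl⟩
          rwa [hpe, ← hch] at this
        simp [hch, ht]
      · have hcb : (a.1 == ch) = false := by simpa using hch
        simp only [List.findIdx?_cons, hcb] at h
        simp at h
        rcases h with ⟨j, hj, hji⟩
        subst hji
        have hne : (a.1 != ch) = true := by simpa using hch
        simp [List.eraseIdx_cons_succ, hne, ih hnd' j hj]

-- A's per-(char, sub) appended chunk equals B's 'extend'
theorem chunk_eq (sub : List (String × String)) (ch k : String) (h : NodupFst sub) :
    (match List.findIdx? (fun p => p.1 == ch) sub with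
     | none => [sub ++ [(ch, k)]]
     | some i => [sub, sub.eraseIdx i ++ [(ch, k)]]) = extendB sub ch k := by
  cases hfi : List.findIdx? (fun p => p.1 == ch) sub with
  | none =>
      have hall : sub.all (fun p => p.1 != ch) = true := by
        rw [List.all_eq_true]
        intro p hp
        have := List.findIdx?_eq_none_iff.mp hfi p hp
        simpa using this
      simp [extendB, hall]
  | some i =>
      have hsome : ¬ (sub.all (fun p => p.1 != ch) = true) := by
        intro hall
        have hnone : List.findIdx? (fun p => p.1 == ch) sub = none := by
          apply List.findIdx?_eq_none_iff.mpr
          intro p hp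
          have := List.all_eq_true.mp hall p hp
          simpa using this
        simp [hnone] at hfi
      simp [extendB, hsome, eraseIdx_eq_filter ch sub h i hfi]

-- invariant preservation through extendB
theorem nodupFst_extendB (sub : List (String × String)) (ch k : String)
    (h : NodupFst sub) : ∀ s ∈ extendB sub ch k, NodupFst s := by
  intro s hs
  unfold extendB at hs
  split at hs
  case isTrue hall =>
    simp only [List.mem_singleton] at hs
    subst hs
    unfold NodupFst
    rw [List.map_append, List.nodup_append]
    refine ⟨h, by simp, ?_⟩
    intro x hx y hy
    have hy' : y = ch := by simpa using hy
    subst hy'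
    obtain ⟨p, hp, hpe⟩ := List.mem_map.mp hx
    have hne := List.all_eq_true.mp hall p hp
    rw [hpe] at hne
    simpa using hne
  case isFalse =>
    simp only [List.mem_cons, List.not_mem_nil, or_false] at hs
    rcases hs with hs | hs
    · subst hs; exact h
    · subst hs
      unfold NodupFst
      rw [List.map_append, List.nodup_append]
      refine ⟨?_, by simp, ?_⟩
      · exact List.Nodup.sublist (List.Sublist.map Prod.fst List.filter_sublist) h
      · intro x hx y hy
        have hy' : y = ch := by simpa using hy
        subst hy'
        obtain ⟨p, hp, hpe⟩ := List.mem_map.mp hx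
        have hne := List.of_mem_filter hp
        rw [hpe] at hne
        simpa using hne

-- the main induction: A's loop equals B's recursion on subs with distinct firsts
theorem loopA_eq_helperB (d : PySem.Dict String (List String)) :
    ∀ (keys : List String) (subs : List (List (String × String))),
    (∀ s ∈ subs, NodupFst s) → loopA d keys subs = helperB d keys subs := by
  intro keys
  induction keys with
  | nil => intro subs _; rfl
  | cons k rest ih =>
      intro subs hinv
      unfold loopA helperB
      have hinner : ∀ ch (acc : List (List (String × String))),
          subs.foldl (fun acc2 sub =>
            match List.findIdx? (fun p => p.1 == ch) sub with
            | none => acc2 ++ [sub ++ [(ch, k)]]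
            | some i => (acc2 ++ [sub]) ++ [sub.eraseIdx i ++ [(ch, k)]]) acc
          = acc ++ subs.flatMap (fun sub => extendB sub ch k) := by
        intro ch acc
        have hcg : subs.foldl (fun acc2 sub =>
            match List.findIdx? (fun p => p.1 == ch) sub with
            | none => acc2 ++ [sub ++ [(ch, k)]]
            | some i => (acc2 ++ [sub]) ++ [sub.eraseIdx i ++ [(ch, k)]]) acc
            = subs.foldl (fun acc2 sub => acc2 ++ extendB sub ch k) acc := by
          apply PySem.List.foldl_congr_mem
          intro acc2 sub hs
          rw [← chunk_eq sub ch k (hinv sub hs)]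
          cases List.findIdx? (fun p => p.1 == ch) sub <;> simp
        rw [hcg, PySem.List.foldl_append_eq_flatMap]
      have houter :
          (d.getD k []).foldl (fun acc ch =>
            subs.foldl (fun acc2 sub =>
              match List.findIdx? (fun p => p.1 == ch) sub with
              | none => acc2 ++ [sub ++ [(ch, k)]]
              | some i => (acc2 ++ [sub]) ++ [sub.eraseIdx i ++ [(ch, k)]]) acc) []
          = (d.getD k []).flatMap (fun ch => subs.flatMap (fun sub => extendB sub ch k)) := by
        have : ((d.getD k []).foldl (fun acc ch =>
            subs.foldl (fun acc2 sub =>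
              match List.findIdx? (fun p => p.1 == ch) sub with
              | none => acc2 ++ [sub ++ [(ch, k)]]
              | some i => (acc2 ++ [sub]) ++ [sub.eraseIdx i ++ [(ch, k)]]) acc) [])
            = (d.getD k []).foldl (fun acc ch =>
                acc ++ subs.flatMap (fun sub => extendB sub ch k)) [] := by
          apply PySem.List.foldl_congr_mem
          intro acc ch _
          exact hinner ch acc
        rw [this, PySem.List.foldl_append_eq_flatMap]
        simp
      simp only [houter, dedupA_eq_self]
      apply ih
      intro s hs
      rw [List.mem_flatMap] at hs
      obtain ⟨ch, _, hs⟩ := hs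
      rw [List.mem_flatMap] at hs
      obtain ⟨sub, hsub, hs⟩ := hs
      exact nodupFst_extendB sub ch k (hinv sub hsub) s hs

-- ===== VERDICT (by name: the statement is the Claim_ definition above) =====
theorem enumerate_l33t_subs_spec : Claim_equal_enumerate_l33t_subs := by
  intro table _
  have h := loopA_eq_helperB (PySem.Dict.mk table) (PySem.Dict.mk table).keys [[]]
    (by intro s hs; simp at hs; subst hs; simp [NodupFst])
  unfold Spec_enumerate_l33t_subs enumerate_l33t_subs enumerate_l33t_subs_alt
  simp only [h]
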